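-- pv_equiv track=rewrite | github.com/gabrielbriones/auto-bedrock-chat-fastapi | tests/test_chat_manager.py | _make_messages
-- ===== SOURCE A (Python) =====
-- def _make_messages(count: int, include_system: bool = True) -> list:
--     """Helper to build a conversation of *count* messages."""
--     messages = []
--     if include_system:
--         messages.append({"role": "system", "content": "You are a helpful assistant."})
--     idx = 0
--     while len(messages) < count:
--         messages.append({"role": "user", "content": f"User message {idx}"})
--         if len(messages) < count:
--             messages.append({"role": "assistant", "content": f"Assistant response {idx}"})
--         idx += 1
--     return messages
-- ===== SOURCE B (Python) =====
-- def _make_messages(count: int, include_system: bool = True) -> list: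
--     """Helper to build a conversation of *count* messages."""
--     base = [{"role": "system", "content": "You are a helpful assistant."}] if include_system else []
--     remaining = max(0, count - len(base))
--     pairs = [
--         [{"role": "user", "content": f"User message {i}"},
--          {"role": "assistant", "content": f"Assistant response {i}"}]
--         for i in range((remaining + 1) // 2)
--     ]
--     return base + [m for pair in pairs for m in pair][:remaining]
-- ===== Notes on version B (the rewrite author's own statement) =====
-- stated objective: alternative
-- what changed: Instead of a while loop emitting messages one at a time with a shared idx and two length checks, B over-produces ceil(remaining/2) complete user/assistant pairs in one comprehension, flattens them in a second pass, and truncates with a slice [:remaining] to drop the surplus assistant message when remaining is odd.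
import Mathlib
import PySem

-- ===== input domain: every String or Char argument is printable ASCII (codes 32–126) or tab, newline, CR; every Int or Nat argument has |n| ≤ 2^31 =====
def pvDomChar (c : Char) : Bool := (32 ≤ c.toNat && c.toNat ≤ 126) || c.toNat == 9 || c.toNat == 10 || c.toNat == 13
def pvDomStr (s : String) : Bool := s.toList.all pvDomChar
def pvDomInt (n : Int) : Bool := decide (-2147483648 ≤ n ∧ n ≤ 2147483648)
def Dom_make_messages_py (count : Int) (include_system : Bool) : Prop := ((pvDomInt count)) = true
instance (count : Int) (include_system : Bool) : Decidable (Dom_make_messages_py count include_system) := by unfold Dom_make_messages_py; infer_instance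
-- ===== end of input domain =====

-- B replaces A's one-message-at-a-time while loop by staged passes: build ceil(remaining/2)
-- complete user/assistant pairs, flatten them, truncate with [:remaining] (objective: alternative).

-- ===== PORT A =====
-- the while loop of A: append user message, conditionally assistant message, idx += 1, repeat
def makeMessagesLoop (count : Int) (messages : List (List (String × String))) (idx : Int) :
    List (List (String × String)) :=
  if _h : (messages.length : Int) < count then
    let m1 := messages ++ [[("role", "user"), ("content", "User message " ++ PySem.Int.toStr idx)]]
    if (m1.length : Int) < count then
      makeMessagesLoop count
        (m1 ++ [[("role", "assistant"), ("content", "Assistant response " ++ PySem.Int.toStr idx)]])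
        (idx + 1)
    else
      makeMessagesLoop count m1 (idx + 1)
  else messages
termination_by (count - messages.length).toNat
decreasing_by
  · simp only [List.length_append, List.length_cons, List.length_nil]
    omega
  · simp only [List.length_append, List.length_cons, List.length_nil]
    omega

def make_messages_py (count : Int) (include_system : Bool) : List (List (String × String)) :=
  let messages : List (List (String × String)) :=
    if include_system then [[("role", "system"), ("content", "You are a helpful assistant.")]] else []
  makeMessagesLoop count messages 0

-- ===== PORT B =====
-- Source B: pairs = [[user i, assistant i] for i in range((remaining+1)//2)];
-- base + flatten(pairs)[:remaining]  (the nested comprehension is the flatten)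
def make_messages_py_alt (count : Int) (include_system : Bool) : List (List (String × String)) :=
  let base : List (List (String × String)) :=
    if include_system then [[("role", "system"), ("content", "You are a helpful assistant.")]] else []
  let remaining : Int := max 0 (count - base.length)
  let pairs : List (List (List (String × String))) :=
    (PySem.List.pyRange 0 (PySem.Int.floordiv (remaining + 1) 2) 1).map (fun i =>
      [[("role", "user"), ("content", "User message " ++ PySem.Int.toStr i)],
       [("role", "assistant"), ("content", "Assistant response " ++ PySem.Int.toStr i)]])
  base ++ PySem.List.slice pairs.flatten none (some remaining)

-- ===== PRECONDITION & SPEC =====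
def Spec_make_messages_py (count : Int) (include_system : Bool) (out : List (List (String × String))) : Prop := out = make_messages_py_alt count include_system
instance (count : Int) (include_system : Bool) (out : List (List (String × String))) : Decidable (Spec_make_messages_py count include_system out) := by unfold Spec_make_messages_py; infer_instance

-- ===== CLAIM (what is proved, stated in full; the proofs are below) =====
def Claim_equal_make_messages_py : Prop := ∀ (count : Int) (include_system : Bool), Dom_make_messages_py count include_system → Spec_make_messages_py count include_system (make_messages_py count include_system)

-- ===== LEMMAS AND PROOFS =====

-- the k-th message appended after the base, when the loop starts with idx = i
def genMsg (i : Int) (k : Int) : List (String × String) :=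
  if PySem.Int.mod k 2 == 0 then
    [("role", "user"), ("content", "User message " ++ PySem.Int.toStr (i + PySem.Int.floordiv k 2))]
  else
    [("role", "assistant"), ("content", "Assistant response " ++ PySem.Int.toStr (i + PySem.Int.floordiv k 2))]

theorem genMsg_shift (i : Int) (k : Int) : genMsg i (2 + k) = genMsg (i + 1) k := by
  have hm : PySem.Int.mod (2 + k) 2 = PySem.Int.mod k 2 := by
    rw [PySem.Int.mod_eq_emod_of_pos (by omega), PySem.Int.mod_eq_emod_of_pos (by omega)]
    omega
  have hd : PySem.Int.floordiv (2 + k) 2 = 1 + PySem.Int.floordiv k 2 := by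
    rw [PySem.Int.floordiv_eq_ediv_of_pos (by omega), PySem.Int.floordiv_eq_ediv_of_pos (by omega)]
    omega
  simp only [genMsg, hm, hd]
  have : i + (1 + PySem.Int.floordiv k 2) = i + 1 + PySem.Int.floordiv k 2 := by ring
  rw [this]

theorem genMsg_zero : genMsg idx 0 = [("role", "user"), ("content", "User message " ++ PySem.Int.toStr idx)] := by
  simp [genMsg, PySem.Int.mod, PySem.Int.floordiv]

theorem genMsg_one : genMsg idx 1 = [("role", "assistant"), ("content", "Assistant response " ++ PySem.Int.toStr idx)] := by
  simp [genMsg, PySem.Int.mod, PySem.Int.floordiv]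

theorem pyRange_shift_two (r : Int) : PySem.List.pyRange 2 r 1 = (PySem.List.pyRange 0 (r - 2) 1).map (fun k => 2 + k) := by
  rw [PySem.List.pyRange_one, PySem.List.pyRange_one]
  have : (r - 2).toNat = (r - 2 - 0).toNat := by omega
  rw [this, List.map_map]
  apply List.map_congr_left
  intro a _
  simp only [Function.comp_apply]
  ring

-- A's loop appends exactly the messages genMsg idx 0, genMsg idx 1, …
theorem loop_eq_aux (n : Nat) : ∀ (count : Int) (messages : List (List (String × String))) (idx : Int),
    (count - messages.length).toNat ≤ n →
    makeMessagesLoop count messages idx =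
      messages ++ (PySem.List.pyRange 0 (count - messages.length) 1).map (genMsg idx) := by
  induction n with
  | zero =>
    intro count messages idx hle
    have h : ¬ ((messages.length : Int) < count) := by omega
    rw [makeMessagesLoop]
    simp only [h, dif_neg, not_false_iff]
    rw [PySem.List.pyRange_one_eq_nil (by omega)]
    simp
  | succ n ih =>
    intro count messages idx hle
    by_cases h : (messages.length : Int) < count
    · rw [makeMessagesLoop]
      simp only [h, dif_pos]
      set m1 : List (List (String × String)) :=
        messages ++ [[("role", "user"), ("content", "User message " ++ PySem.Int.toStr idx)]] with hm1
      have hm1len : (m1.length : Int) = (messages.length : Int) + 1 := by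
        simp [hm1]
      by_cases h1 : (m1.length : Int) < count
      · simp only [h1, if_pos]
        set m2 : List (List (String × String)) :=
          m1 ++ [[("role", "assistant"), ("content", "Assistant response " ++ PySem.Int.toStr idx)]] with hm2
        have hm2len : (m2.length : Int) = (messages.length : Int) + 2 := by
          simp [hm2, hm1]
        rw [ih count m2 (idx + 1) (by omega)]
        set r : Int := count - (messages.length : Int) with hr
        have hr2 : (2 : Int) ≤ r := by omega
        have hrest : count - (m2.length : Int) = r - 2 := by omega
        rw [hrest]
        rw [PySem.List.pyRange_one_append 0 2 r (by omega) (by omega)]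
        rw [show PySem.List.pyRange 0 2 1 = [0, 1] from by decide]
        rw [pyRange_shift_two r, List.map_append, List.map_cons, List.map_cons, List.map_nil, List.map_map]
        have hmap : (PySem.List.pyRange 0 (r - 2) 1).map (genMsg idx ∘ fun k => 2 + k) =
            (PySem.List.pyRange 0 (r - 2) 1).map (genMsg (idx + 1)) := by
          apply List.map_congr_left
          intro a _
          exact genMsg_shift idx a
        rw [hmap, genMsg_zero, genMsg_one]
        simp [hm2, hm1]
      · simp only [h1, if_neg, not_false_iff]
        rw [ih count m1 (idx + 1) (by omega)]
        have hr1 : count - (messages.length : Int) = 1 := by omega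
        have hr0 : count - (m1.length : Int) = 0 := by omega
        rw [hr1, hr0]
        rw [show PySem.List.pyRange 0 1 1 = [0] from by decide]
        rw [show PySem.List.pyRange 0 0 1 = [] from by decide]
        simp [hm1, genMsg_zero]
    · rw [makeMessagesLoop]
      simp only [h, dif_neg, not_false_iff]
      rw [PySem.List.pyRange_one_eq_nil (by omega)]
      simp

theorem loop_eq (count : Int) (messages : List (List (String × String))) (idx : Int) :
    makeMessagesLoop count messages idx =
      messages ++ (PySem.List.pyRange 0 (count - messages.length) 1).map (genMsg idx) :=
  loop_eq_aux (count - messages.length).toNat count messages idx le_rfl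

-- B-side: flattening n full pairs gives the first 2n messages of the genMsg stream
theorem genMsg_even (i : Int) (_h : 0 ≤ i) :
    genMsg 0 (2 * i) = [("role", "user"), ("content", "User message " ++ PySem.Int.toStr i)] := by
  have hm : PySem.Int.mod (2 * i) 2 = 0 := by
    rw [PySem.Int.mod_eq_emod_of_pos (by omega)]; omega
  have hd : PySem.Int.floordiv (2 * i) 2 = i := by
    rw [PySem.Int.floordiv_eq_ediv_of_pos (by omega)]; omega
  rw [genMsg, hm, hd]; norm_num

theorem genMsg_odd (i : Int) (_h : 0 ≤ i) :
    genMsg 0 (2 * i + 1) = [("role", "assistant"), ("content", "Assistant response " ++ PySem.Int.toStr i)] := by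
  have hm : PySem.Int.mod (2 * i + 1) 2 = 1 := by
    rw [PySem.Int.mod_eq_emod_of_pos (by omega)]; omega
  have hd : PySem.Int.floordiv (2 * i + 1) 2 = i := by
    rw [PySem.Int.floordiv_eq_ediv_of_pos (by omega)]; omega
  rw [genMsg, hm, hd]; norm_num

theorem flatten_pairs (n : Nat) :
    ((PySem.List.pyRange 0 ((n : Nat) : Int) 1).map (fun i =>
      [[("role", "user"), ("content", "User message " ++ PySem.Int.toStr i)],
       [("role", "assistant"), ("content", "Assistant response " ++ PySem.Int.toStr i)]])).flatten =
    (PySem.List.pyRange 0 ((2 * n : Nat) : Int) 1).map (genMsg 0) := by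
  induction n with
  | zero => simp [PySem.List.pyRange_one_eq_nil]
  | succ n ih =>
    rw [show ((n + 1 : Nat) : Int) = (n : Int) + 1 from by push_cast; ring]
    rw [PySem.List.pyRange_one_succ_right (by positivity)]
    rw [List.map_append, List.flatten_append, ih]
    rw [show ((2 * (n + 1) : Nat) : Int) = (((2 * n : Nat) : Int) + 1) + 1 from by push_cast; ring]
    rw [PySem.List.pyRange_one_succ_right (by positivity),
        PySem.List.pyRange_one_succ_right (by positivity)]
    simp only [List.map_append, List.map_cons, List.map_nil, List.flatten_cons, List.flatten_nil,
      List.append_nil, List.append_assoc]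
    have he : genMsg 0 ((2 * n : Nat) : Int) =
        [("role", "user"), ("content", "User message " ++ PySem.Int.toStr (n : Int))] := by
      rw [show ((2 * n : Nat) : Int) = 2 * (n : Int) from by push_cast; ring]
      exact genMsg_even n (by positivity)
    have ho : genMsg 0 (((2 * n : Nat) : Int) + 1) =
        [("role", "assistant"), ("content", "Assistant response " ++ PySem.Int.toStr (n : Int))] := by
      rw [show ((2 * n : Nat) : Int) + 1 = 2 * (n : Int) + 1 from by push_cast; ring]
      exact genMsg_odd n (by positivity)
    rw [he, ho]
    simp

-- ===== VERDICT (by name: the statement is the Claim_ definition above) =====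
theorem make_messages_py_spec : Claim_equal_make_messages_py := by
  intro count include_system _
  unfold Spec_make_messages_py make_messages_py make_messages_py_alt
  rw [loop_eq]
  set base : List (List (String × String)) :=
    if include_system then [[("role", "system"), ("content", "You are a helpful assistant.")]] else []
  have hr0 : (0 : Int) ≤ max 0 (count - (base.length : Int)) := le_max_left _ _
  have hrange : PySem.List.pyRange 0 (count - base.length) 1 =
      PySem.List.pyRange 0 (max 0 (count - (base.length : Int))) 1 := by
    by_cases h : count - (base.length : Int) ≤ 0
    · rw [PySem.List.pyRange_one_eq_nil h, PySem.List.pyRange_one_eq_nil (by omega)]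
    · rw [max_eq_right (by omega)]
  rw [hrange]
  congr 1
  have hp : PySem.Int.floordiv (max 0 (count - (base.length : Int)) + 1) 2 =
      ((((max 0 (count - (base.length : Int))).toNat + 1) / 2 : Nat) : Int) := by
    rw [PySem.Int.floordiv_eq_ediv_of_pos (by omega)]
    omega
  rw [hp, flatten_pairs, PySem.List.slice_to _ hr0]
  rw [← List.map_take]
  have htake : (PySem.List.pyRange 0 ((2 * (((max 0 (count - (base.length : Int))).toNat + 1) / 2) : Nat) : Int) 1).take
      (max 0 (count - (base.length : Int))).toNat =
      PySem.List.pyRange 0 (max 0 (count - (base.length : Int))) 1 := by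
    rw [PySem.List.pyRange_one, PySem.List.pyRange_one, ← List.map_take, List.take_range]
    have hmm : min (max 0 (count - (base.length : Int))).toNat
        ((((2 * (((max 0 (count - (base.length : Int))).toNat + 1) / 2) : Nat) : Int) - 0).toNat) =
        (max 0 (count - (base.length : Int)) - 0).toNat := by omega
    rw [hmm]
  rw [htake]
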